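-- pv_equiv track=rewrite | github.com/Carlos16/Tesis-IGP | code/Theory/Analisis/bounds.py | procce_
-- ===== SOURCE A (Python) =====
-- def procce_(Arr,Arr2):
--     Y=[]
--     X=[]
--     for i in range(len(Arr)):
--         n = len(Arr[i])
--         for k in range(n):
--             try:
--                 Y[k].append(Arr[i][k])
--                 X[k].append(Arr2[i])
--             except:
--                 X.append([])
--                 Y.append([])
--                 Y[k].append(Arr[i][k])
--                 X[k].append(Arr2[i])
--
--     return X,Y
-- ===== SOURCE B (Python) =====
-- def procce_(Arr, Arr2):
--     # Column-major: compute the column count first, then build each column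
--     # in one pass over the rows (values appear in ascending row order).
--     maxlen = max((len(r) for r in Arr), default=0)
--     X = []
--     Y = []
--     for k in range(maxlen):
--         Y.append([r[k] for r in Arr if k < len(r)])
--         X.append([Arr2[i] for i, r in enumerate(Arr) if k < len(r)])
--     return X, Y
-- ===== Notes on version B (the rewrite author's own statement) =====
-- stated objective: alternative
-- what changed: B flips the loop nesting to column-major: it computes the column count up front and builds each output column with a single comprehension over the rows, instead of A's row-major loops that grow the output lazily via an exception handler.
import Mathlib
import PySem

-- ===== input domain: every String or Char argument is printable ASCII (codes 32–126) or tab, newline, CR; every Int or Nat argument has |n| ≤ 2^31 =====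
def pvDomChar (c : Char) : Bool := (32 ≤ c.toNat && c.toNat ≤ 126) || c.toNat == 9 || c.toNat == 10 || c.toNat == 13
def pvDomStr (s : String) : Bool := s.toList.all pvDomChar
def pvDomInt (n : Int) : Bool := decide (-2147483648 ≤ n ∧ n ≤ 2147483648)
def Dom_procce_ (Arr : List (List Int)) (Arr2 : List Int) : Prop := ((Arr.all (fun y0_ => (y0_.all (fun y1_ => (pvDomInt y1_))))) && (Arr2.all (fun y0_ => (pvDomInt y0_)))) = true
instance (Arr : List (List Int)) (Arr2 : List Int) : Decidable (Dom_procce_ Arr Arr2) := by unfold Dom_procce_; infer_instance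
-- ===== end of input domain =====

-- B rebuilds the (X, Y) column grouping column-major (columns outer, rows inner) instead of
-- A's row-major loops with exception-driven lazy growth; objective: alternative decomposition.

-- ===== PORT A =====
-- Row-major fold; the try/except becomes the `k < Y.length` test (under Pre_ the only
-- exception the try can raise is the IndexError from `Y[k]`, since `Arr2[i]` is in range
-- whenever row i is nonempty).  `Arr.getD i []` is exact (i < Arr.length by the range),
-- `Arr2.getD i 0` is exact under Pre_.
def procce_ (Arr : List (List Int)) (Arr2 : List Int) : List (List Int) × List (List Int) :=
  (List.range Arr.length).foldl (fun st i =>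
    let row := Arr.getD i []
    (List.range row.length).foldl (fun st k =>
      if k < st.2.length then
        (st.1.modify k (· ++ [Arr2.getD i 0]), st.2.modify k (· ++ [row.getD k 0]))
      else
        ((st.1 ++ [[]]).modify k (· ++ [Arr2.getD i 0]),
         (st.2 ++ [[]]).modify k (· ++ [row.getD k 0]))) st)
    (([] : List (List Int)), ([] : List (List Int)))

-- ===== PORT B =====
-- Column-major, following Source B: column count first, then one comprehension per column.
-- `enumerate(Arr)` is `Arr.zipIdx` (index in the second component); `r[k]` with the guard
-- `k < len(r)` is exactly `r.getD k 0`; `Arr2[i]` is `Arr2.getD i 0`, exact under Pre_.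
def procce__alt (Arr : List (List Int)) (Arr2 : List Int) : List (List Int) × List (List Int) :=
  let maxlen := (Arr.map List.length).foldl max 0
  let Y := (List.range maxlen).map (fun k =>
    Arr.filterMap (fun r => if k < r.length then some (r.getD k 0) else none))
  let X := (List.range maxlen).map (fun k =>
    Arr.zipIdx.filterMap (fun p => if k < p.1.length then some (Arr2.getD p.2 0) else none))
  (X, Y)

-- ===== PRECONDITION & SPEC =====
-- Pre_ excludes exactly the inputs on which the Python A raises an uncaught IndexError:
-- a nonempty row whose index is out of range of Arr2 (the except-handler re-raises there).
def Pre_procce_ (Arr : List (List Int)) (Arr2 : List Int) : Prop :=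
  ∀ i ∈ List.range Arr.length, Arr.getD i [] ≠ [] → i < Arr2.length
instance (Arr : List (List Int)) (Arr2 : List Int) : Decidable (Pre_procce_ Arr Arr2) := by
  unfold Pre_procce_; infer_instance
def pvWitness_procce_ : List (List Int) × List Int := ([[1, 2], [3]], [10, 20])
def Spec_procce_ (Arr : List (List Int)) (Arr2 : List Int) (out : List (List Int) × List (List Int)) : Prop := out = procce__alt Arr Arr2
instance (Arr : List (List Int)) (Arr2 : List Int) (out : List (List Int) × List (List Int)) : Decidable (Spec_procce_ Arr Arr2 out) := by unfold Spec_procce_; infer_instance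

-- ===== CLAIM (what is proved, stated in full; the proofs are below) =====
def Claim_equal_procce_ : Prop := ∀ (Arr : List (List Int)) (Arr2 : List Int), Dom_procce_ Arr Arr2 → Pre_procce_ Arr Arr2 → Spec_procce_ Arr Arr2 (procce_ Arr Arr2)

-- ===== LEMMAS AND PROOFS =====

-- Rows paired with their Arr2 value (totalised with getD, as in both ports).
def pvPairs (Arr : List (List Int)) (Arr2 : List Int) : List (List Int × Int) :=
  Arr.zipIdx.map (fun p => (p.1, Arr2.getD p.2 0))

def pvM (ps : List (List Int × Int)) : Nat := ps.foldl (fun m p => max m p.1.length) 0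

def pvColY (ps : List (List Int × Int)) (k : Nat) : List Int :=
  ps.filterMap (fun p => if k < p.1.length then some (p.1.getD k 0) else none)

def pvColX (ps : List (List Int × Int)) (k : Nat) : List Int :=
  ps.filterMap (fun p => if k < p.1.length then some p.2 else none)

def pvT (ps : List (List Int × Int)) : List (List Int) × List (List Int) :=
  ((List.range (pvM ps)).map (pvColX ps), (List.range (pvM ps)).map (pvColY ps))

def pvStep (st : List (List Int) × List (List Int)) (p : List Int × Int) :
    List (List Int) × List (List Int) :=
  (List.range p.1.length).foldl (fun st k =>
    if k < st.2.length then
      (st.1.modify k (· ++ [p.2]), st.2.modify k (· ++ [p.1.getD k 0]))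
    else
      ((st.1 ++ [[]]).modify k (· ++ [p.2]),
       (st.2 ++ [[]]).modify k (· ++ [p.1.getD k 0]))) st

theorem pv_modify_map_range {α : Type} (m j : Nat) (g : Nat → α) (h : α → α) (hj : j < m) :
    (List.map g (List.range m)).modify j h
      = List.map (fun k => if k = j then h (g k) else g k) (List.range m) := by
  apply List.ext_getElem
  · simp
  · intro n h1 h2
    rw [List.getElem_modify]
    simp only [List.getElem_map, List.getElem_range]
    by_cases hnj : n = j
    · simp [hnj]
    · simp [hnj, Ne.symm hnj]

theorem pv_modify_append_last {α : Type} (l : List α) (a : α) (h : α → α) (n : Nat)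
    (hn : n = l.length) : (l ++ [a]).modify n h = l ++ [h a] := by
  subst hn
  induction l with
  | nil => simp [List.modify]
  | cons x xs ih => simpa [List.modify] using ih

theorem pvM_le (ps : List (List Int × Int)) (p : List Int × Int) (hp : p ∈ ps) :
    p.1.length ≤ pvM ps := by
  induction ps using List.reverseRecOn with
  | nil => simp at hp
  | append_singleton l a ih =>
    simp only [pvM, List.foldl_append, List.foldl_cons, List.foldl_nil] at *
    rcases List.mem_append.mp hp with h | h
    · exact le_trans (ih h) (le_max_left _ _)
    · simp at h; subst h; exact le_max_right _ _

theorem pvM_append (ps : List (List Int × Int)) (p : List Int × Int) :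
    pvM (ps ++ [p]) = max (pvM ps) p.1.length := by
  simp [pvM, List.foldl_append]

theorem pvColY_append (ps : List (List Int × Int)) (p : List Int × Int) (k : Nat) :
    pvColY (ps ++ [p]) k
      = pvColY ps k ++ (if k < p.1.length then [p.1.getD k 0] else []) := by
  simp only [pvColY, List.filterMap_append, List.filterMap_cons, List.filterMap_nil]
  split_ifs <;> simp

theorem pvColX_append (ps : List (List Int × Int)) (p : List Int × Int) (k : Nat) :
    pvColX (ps ++ [p]) k = pvColX ps k ++ (if k < p.1.length then [p.2] else []) := by
  simp only [pvColX, List.filterMap_append, List.filterMap_cons, List.filterMap_nil]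
  split_ifs <;> simp

theorem pvColY_of_ge (ps : List (List Int × Int)) (k : Nat) (hk : pvM ps ≤ k) :
    pvColY ps k = [] := by
  simp only [pvColY, List.filterMap_eq_nil_iff]
  intro p hp
  have := pvM_le ps p hp
  simp [show ¬ k < p.1.length by omega]

theorem pvColX_of_ge (ps : List (List Int × Int)) (k : Nat) (hk : pvM ps ≤ k) :
    pvColX ps k = [] := by
  simp only [pvColX, List.filterMap_eq_nil_iff]
  intro p hp
  have := pvM_le ps p hp
  simp [show ¬ k < p.1.length by omega]

-- Inner-loop invariant: after j columns of a new row have been processed.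
theorem pvStep_invariant (ps : List (List Int × Int)) (p : List Int × Int)
    (j : Nat) (_hj : j ≤ p.1.length) :
    (List.range j).foldl (fun st k =>
      if k < st.2.length then
        (st.1.modify k (· ++ [p.2]), st.2.modify k (· ++ [p.1.getD k 0]))
      else
        ((st.1 ++ [[]]).modify k (· ++ [p.2]),
         (st.2 ++ [[]]).modify k (· ++ [p.1.getD k 0]))) (pvT ps)
    = ((List.range (max (pvM ps) j)).map
         (fun k => pvColX ps k ++ (if k < j then [p.2] else [])),
       (List.range (max (pvM ps) j)).map
         (fun k => pvColY ps k ++ (if k < j then [p.1.getD k 0] else []))) := by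
  induction j with
  | zero => simp [pvT]
  | succ j ih =>
    have hj' : j ≤ p.1.length := by omega
    rw [List.range_succ, List.foldl_append, ih hj', List.foldl_cons, List.foldl_nil]
    by_cases hlt : j < pvM ps
    · have hm : max (pvM ps) j = pvM ps := by omega
      have hm' : max (pvM ps) (j + 1) = pvM ps := by omega
      rw [if_pos (by simp only [List.length_map, List.length_range]; omega)]
      simp only [hm, hm']
      rw [pv_modify_map_range _ j _ _ (by omega), pv_modify_map_range _ j _ _ (by omega)]
      simp only [Prod.mk.injEq]
      constructor <;>
      · apply List.map_congr_left
        intro k hk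
        simp only [List.mem_range] at hk
        by_cases h : k = j
        · subst h; simp
        · by_cases hkj : k < j
          · simp [h, hkj, show k < j + 1 from by omega]
          · simp [h, hkj, show ¬ k < j + 1 from by omega]
    · have hm : max (pvM ps) j = j := by omega
      have hm' : max (pvM ps) (j + 1) = j + 1 := by omega
      rw [if_neg (by simp only [List.length_map, List.length_range]; omega)]
      simp only [hm, hm']
      rw [pv_modify_append_last _ _ _ j (by simp),
          pv_modify_append_last _ _ _ j (by simp)]
      rw [List.range_succ, List.map_append, List.map_append]
      simp only [Prod.mk.injEq, List.map_cons, List.map_nil]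
      constructor <;>
      · refine congrArg₂ (· ++ ·) ?_ ?_
        · apply List.map_congr_left
          intro k hk
          simp only [List.mem_range] at hk
          simp [show k < j from hk, show k < j + 1 from by omega]
        · first
          | rw [pvColX_of_ge ps j (by omega)]
          | rw [pvColY_of_ge ps j (by omega)]
          simp [show j < j + 1 from by omega]

theorem pvStep_T (ps : List (List Int × Int)) (p : List Int × Int) :
    pvStep (pvT ps) p = pvT (ps ++ [p]) := by
  unfold pvStep
  rw [pvStep_invariant ps p p.1.length le_rfl]
  unfold pvT
  rw [pvM_append]
  simp only [Prod.mk.injEq]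
  constructor <;>
  · apply List.map_congr_left
    intro k _
    first
    | rw [pvColX_append]
    | rw [pvColY_append]

theorem pvFold_T (ps : List (List Int × Int)) :
    ps.foldl pvStep ([], []) = pvT ps := by
  induction ps using List.reverseRecOn with
  | nil => rfl
  | append_singleton l a ih => rw [List.foldl_append, List.foldl_cons, List.foldl_nil, ih, pvStep_T]

-- Fold over range(len l) reading l.getD = fold over zipIdx.
theorem pv_foldl_range_zipIdx {α β : Type} (l : List α) (d : α)
    (G : β → α × Nat → β) (init : β) :
    (List.range l.length).foldl (fun st i => G st (l.getD i d, i)) init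
      = l.zipIdx.foldl G init := by
  induction l using List.reverseRecOn generalizing init with
  | nil => simp
  | append_singleton l' a ih =>
    rw [List.zipIdx_append, List.foldl_append]
    simp only [List.length_append, List.length_cons, List.length_nil]
    rw [List.range_succ, List.foldl_append]
    have hcong : (List.range l'.length).foldl
        (fun st i => G st ((l' ++ [a]).getD i d, i)) init
        = (List.range l'.length).foldl (fun st i => G st (l'.getD i d, i)) init := by
      apply PySem.List.foldl_congr_mem
      intro acc i hi
      simp only [List.mem_range] at hi
      rw [List.getD_append _ _ _ _ hi]
    rw [hcong, ih]
    simp [List.zipIdx]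

theorem pv_procce_eq_T (Arr : List (List Int)) (Arr2 : List Int) :
    procce_ Arr Arr2 = pvT (pvPairs Arr Arr2) := by
  unfold procce_
  rw [show (fun (st : List (List Int) × List (List Int)) i =>
      let row := Arr.getD i []
      (List.range row.length).foldl (fun st k =>
        if k < st.2.length then
          (st.1.modify k (· ++ [Arr2.getD i 0]), st.2.modify k (· ++ [row.getD k 0]))
        else
          ((st.1 ++ [[]]).modify k (· ++ [Arr2.getD i 0]),
           (st.2 ++ [[]]).modify k (· ++ [row.getD k 0]))) st)
    = (fun st i => pvStep st (Arr.getD i [], Arr2.getD i 0)) from rfl]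
  rw [pv_foldl_range_zipIdx Arr [] (fun st p => pvStep st (p.1, Arr2.getD p.2 0)) ([], [])]
  rw [← pvFold_T]
  unfold pvPairs
  rw [List.foldl_map]

theorem pv_alt_eq_T (Arr : List (List Int)) (Arr2 : List Int) :
    procce__alt Arr Arr2 = pvT (pvPairs Arr Arr2) := by
  have hfst : List.map Prod.fst Arr.zipIdx = Arr := List.zipIdx_map_fst 0 Arr
  have hM : (Arr.map List.length).foldl max 0 = pvM (pvPairs Arr Arr2) := by
    unfold pvM pvPairs
    rw [List.foldl_map, List.foldl_map]
    conv_lhs => rw [← hfst]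
    rw [List.foldl_map]
  have hX : ∀ k, Arr.zipIdx.filterMap
      (fun p => if k < p.1.length then some (Arr2.getD p.2 0) else none)
      = pvColX (pvPairs Arr Arr2) k := by
    intro k
    unfold pvColX pvPairs
    rw [List.filterMap_map]
    rfl
  have hY : ∀ k, Arr.filterMap (fun r => if k < r.length then some (r.getD k 0) else none)
      = pvColY (pvPairs Arr Arr2) k := by
    intro k
    unfold pvColY pvPairs
    rw [List.filterMap_map]
    conv_lhs => rw [← hfst, List.filterMap_map]
    rfl
  show ((List.range ((Arr.map List.length).foldl max 0)).map (fun k =>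
      Arr.zipIdx.filterMap (fun p => if k < p.1.length then some (Arr2.getD p.2 0) else none)),
    (List.range ((Arr.map List.length).foldl max 0)).map (fun k =>
      Arr.filterMap (fun r => if k < r.length then some (r.getD k 0) else none))) = _
  unfold pvT
  rw [hM]
  simp only [Prod.mk.injEq]
  constructor <;> (apply List.map_congr_left; intro k _)
  · exact hX k
  · exact hY k

-- ===== VERDICT (by name: the statement is the Claim_ definition above) =====
theorem procce__spec : Claim_equal_procce_ := by
  intro Arr Arr2 _ _
  unfold Spec_procce_
  rw [pv_procce_eq_T, pv_alt_eq_T]
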